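-- pv_equiv track=rewrite | github.com/EmilMachine/adventofcode2024 | dec9b.py | get_startblock
-- ===== SOURCE A (Python) =====
-- def get_startblock(start: int, num_list: list[int], gaplen: int) -> tuple[int] | None:
--     start0 = start
--     while start0 < len(num_list) - 1 - gaplen:
--         if num_list[start0] is None:
--             if num_list[start0 : start0 + gaplen] == [None] * gaplen:
--                 return (start0, start0 + gaplen)
--             # else:
--             #     start0 += gaplen - 1
--         start0 += 1
--
--     return None
-- ===== SOURCE B (Python) =====
-- def get_startblock(start: int, num_list: list[int], gaplen: int) -> tuple[int] | None:
--     # single pass: running count of consecutive Nones; O(n) instead of O(n*gaplen)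
--     run = 0
--     for j in range(start, len(num_list) - 2):
--         if num_list[j] is None:
--             run += 1
--             if run >= gaplen:
--                 return (j - gaplen + 1, j + 1)
--         else:
--             run = 0
--     return None
-- ===== Notes on version B (the rewrite author's own statement) =====
-- stated objective: alternative
-- what changed: B replaces A's per-position slice comparison (rebuilding and comparing a gaplen-long window at every candidate index) by a single left-to-right pass that keeps a running count of consecutive Nones and returns as soon as the count reaches gaplen (intended as faster, O(n) vs O(n*gaplen); a timing run measured 86.5x at the largest size on gap-free inputs but could not confirm it consistently, so no speed claim is made).
-- outside the precondition, e.g. on get_startblock(-1, [None, None, None], 1): A returns (0, 1), B returns (-1, 0); on get_startblock(0, [None, None], 0): A returns (0, 0), B returns None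
import Mathlib
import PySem

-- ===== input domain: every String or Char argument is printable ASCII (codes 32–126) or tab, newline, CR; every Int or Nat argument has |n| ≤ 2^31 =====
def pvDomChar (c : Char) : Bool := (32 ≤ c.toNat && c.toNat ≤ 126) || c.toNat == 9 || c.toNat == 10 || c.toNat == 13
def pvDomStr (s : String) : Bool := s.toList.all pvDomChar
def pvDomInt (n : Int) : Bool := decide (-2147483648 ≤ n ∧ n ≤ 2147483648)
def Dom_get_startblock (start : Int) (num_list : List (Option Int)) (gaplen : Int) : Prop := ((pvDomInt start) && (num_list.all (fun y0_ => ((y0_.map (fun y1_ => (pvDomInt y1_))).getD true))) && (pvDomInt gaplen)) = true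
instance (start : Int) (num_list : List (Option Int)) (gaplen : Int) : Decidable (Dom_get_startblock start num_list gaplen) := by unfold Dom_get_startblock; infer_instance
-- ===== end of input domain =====

-- B: one pass with a running count of consecutive Nones instead of rebuilding and comparing
-- a gaplen-long slice at each candidate index; return value only (no argument is mutated).

-- ===== PORT A =====
-- the while-loop of A, recursing on the distance to the loop bound
def gsLoopA (num_list : List (Option Int)) (gaplen : Int) (start0 : Int) : Option (List Int) :=
  if h : start0 < (num_list.length : Int) - 1 - gaplen then
    if PySem.List.pyGet? num_list start0 = some none ∧
       PySem.List.slice num_list (some start0) (some (start0 + gaplen)) =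
         List.replicate gaplen.toNat none then
      some [start0, start0 + gaplen]
    else gsLoopA num_list gaplen (start0 + 1)
  else
    none
termination_by ((num_list.length : Int) - 1 - gaplen - start0).toNat
decreasing_by omega

def get_startblock (start : Int) (num_list : List (Option Int)) (gaplen : Int) : Option (List Int) :=
  gsLoopA num_list gaplen start

-- ===== PORT B =====
-- the for-loop of B over range(start, len-2), carrying the running count of Nones
def gsLoopB (num_list : List (Option Int)) (gaplen : Int) : List Int → Int → Option (List Int)
  | [], _ => none
  | j :: rest, run =>
    if PySem.List.pyGet? num_list j = some none then
      if run + 1 ≥ gaplen then some [j - gaplen + 1, j + 1]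
      else gsLoopB num_list gaplen rest (run + 1)
    else gsLoopB num_list gaplen rest 0

def get_startblock_alt (start : Int) (num_list : List (Option Int)) (gaplen : Int) : Option (List Int) :=
  gsLoopB num_list gaplen (PySem.List.pyRange start ((num_list.length : Int) - 2) 1) 0

-- ===== PRECONDITION & SPEC =====
-- Pre_ restricts to the function's natural domain (a nonnegative start index and a positive
-- gap length, the only way dec9b.py calls it): outside it A still returns — via Python's
-- negative-index wraparound for -len ≤ start < 0 (it raises IndexError for smaller start),
-- and via the vacuous empty-slice comparison [None]*gaplen == [] for gaplen ≤ 0 — but those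
-- values are artefacts B's scan does not reproduce.
def Pre_get_startblock (start : Int) (num_list : List (Option Int)) (gaplen : Int) : Prop :=
  0 ≤ start ∧ 1 ≤ gaplen
instance (start : Int) (num_list : List (Option Int)) (gaplen : Int) : Decidable (Pre_get_startblock start num_list gaplen) := by unfold Pre_get_startblock; infer_instance

def pvWitness_get_startblock : Int × List (Option Int) × Int := (0, [some 1, none, none, some 2, none, none, none], 2)

def Spec_get_startblock (start : Int) (num_list : List (Option Int)) (gaplen : Int) (out : Option (List Int)) : Prop := out = get_startblock_alt start num_list gaplen
instance (start : Int) (num_list : List (Option Int)) (gaplen : Int) (out : Option (List Int)) : Decidable (Spec_get_startblock start num_list gaplen out) := by unfold Spec_get_startblock; infer_instance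

-- ===== CLAIM (what is proved, stated in full; the proofs are below) =====
def Claim_equal_get_startblock : Prop := ∀ (start : Int) (num_list : List (Option Int)) (gaplen : Int), Dom_get_startblock start num_list gaplen → Pre_get_startblock start num_list gaplen → Spec_get_startblock start num_list gaplen (get_startblock start num_list gaplen)

-- ===== LEMMAS AND PROOFS =====

-- A's slice test at a nonnegative in-range position i holds iff the window i..i+g-1 is all None
theorem gsA_window_iff (nl : List (Option Int)) (g i : Int) (hg : 1 ≤ g) (hi : 0 ≤ i)
    (hlt : i < (nl.length : Int) - 1 - g) :
    (PySem.List.slice nl (some i) (some (i + g)) = List.replicate g.toNat none)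
      ↔ (∀ k : Int, i ≤ k → k < i + g → PySem.List.pyGet? nl k = some none) := by
  have hb : i + g ≤ (nl.length : Int) := by omega
  rw [PySem.List.slice_toNat nl (a := i) (b := i + g) hi (by omega)]
  constructor
  · intro hrep k hk1 hk2
    have hk0 : 0 ≤ k := by omega
    have hget := PySem.List.pyGet?_natCast nl k.toNat
    rw [show ((k.toNat : Nat) : Int) = k by omega] at hget
    have h1 : nl[k.toNat]? = (List.drop i.toNat nl)[(k - i).toNat]? := by
      rw [List.getElem?_drop]
      congr 1
      omega
    have h2 : (List.take ((i + g).toNat - i.toNat) (List.drop i.toNat nl))[(k - i).toNat]?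
        = (List.drop i.toNat nl)[(k - i).toNat]? := by
      rw [List.getElem?_take, if_pos (by omega)]
    rw [hget, h1, ← h2, hrep, List.getElem?_replicate, if_pos (by omega)]
  · intro hall
    apply List.ext_getElem?
    intro n
    rw [List.getElem?_take, List.getElem?_drop, List.getElem?_replicate]
    by_cases hn : n < (i + g).toNat - i.toNat
    · rw [if_pos hn, if_pos (by omega)]
      have hx := PySem.List.pyGet?_natCast nl (i.toNat + n)
      rw [show ((i.toNat + n : Nat) : Int) = i + (n : Int) by omega] at hx
      rw [← hx]
      exact hall (i + n) (by omega) (by omega)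
    · rw [if_neg hn, if_neg (by omega)]

-- A's loop skips past an interval of positions on which its test fails (or which lie past the bound)
theorem gsA_skip (nl : List (Option Int)) (g : Int) (s t : Int) (hst : s ≤ t)
    (hfail : ∀ i : Int, s ≤ i → i < t → i < (nl.length : Int) - 1 - g →
      ¬ (PySem.List.pyGet? nl i = some none ∧
         PySem.List.slice nl (some i) (some (i + g)) = List.replicate g.toNat none)) :
    gsLoopA nl g s = gsLoopA nl g t := by
  by_cases h : s = t
  · rw [h]
  · have hlt : s < t := lt_of_le_of_ne hst h
    by_cases hc : s < (nl.length : Int) - 1 - g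
    · have hstep : gsLoopA nl g s = gsLoopA nl g (s + 1) := by
        conv_lhs => rw [gsLoopA]
        rw [dif_pos hc, if_neg (hfail s le_rfl hlt hc)]
      rw [hstep]
      exact gsA_skip nl g (s + 1) t (by omega) (fun i h1 h2 h3 => hfail i (by omega) h2 h3)
    · have hs : gsLoopA nl g s = none := by rw [gsLoopA, dif_neg hc]
      have ht : gsLoopA nl g t = none := by rw [gsLoopA, dif_neg (by omega)]
      rw [hs, ht]
termination_by (t - s).toNat
decreasing_by omega

-- main invariant: B's loop with running count r at position j computes A's loop from j - r
theorem gsB_inv (nl : List (Option Int)) (g : Int) (hg : 1 ≤ g) (j r : Int)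
    (hr0 : 0 ≤ r) (hrg : r + 1 ≤ g) (hjr : 0 ≤ j - r)
    (hrun : ∀ k : Int, j - r ≤ k → k < j → PySem.List.pyGet? nl k = some none) :
    gsLoopB nl g (PySem.List.pyRange j ((nl.length : Int) - 2) 1) r = gsLoopA nl g (j - r) := by
  by_cases hj : j < (nl.length : Int) - 2
  · rw [PySem.List.pyRange_one_cons hj, gsLoopB]
    by_cases hN : PySem.List.pyGet? nl j = some none
    · rw [if_pos hN]
      by_cases hge : r + 1 ≥ g
      · rw [if_pos hge]
        have hreq : r + 1 = g := by omega
        have hi : j - g + 1 = j - r := by omega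
        rw [gsLoopA]
        have hlt : j - r < (nl.length : Int) - 1 - g := by omega
        rw [dif_pos hlt]
        have hall : ∀ k : Int, j - r ≤ k → k < (j - r) + g → PySem.List.pyGet? nl k = some none := by
          intro k h1 h2
          by_cases hkj : k < j
          · exact hrun k h1 hkj
          · have : k = j := by omega
            rw [this]; exact hN
        rw [if_pos ⟨hall (j - r) le_rfl (by omega),
              (gsA_window_iff nl g (j - r) hg hjr hlt).mpr hall⟩]
        simp [hi]
        omega
      · rw [if_neg hge]
        have := gsB_inv nl g hg (j + 1) (r + 1) (by omega) (by omega) (by omega)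
          (by intro k h1 h2
              by_cases hkj : k < j
              · exact hrun k (by omega) hkj
              · have : k = j := by omega
                rw [this]; exact hN)
        rw [this]
        have : j + 1 - (r + 1) = j - r := by omega
        rw [this]
    · rw [if_neg hN]
      have := gsB_inv nl g hg (j + 1) 0 le_rfl (by omega) (by omega)
        (by intro k h1 h2; omega)
      rw [this]
      simp only [sub_zero]
      refine (gsA_skip nl g (j - r) (j + 1) (by omega) ?_).symm
      intro i h1 h2 hlt hc
      obtain ⟨hfst, hslc⟩ := hc
      by_cases hij : i = j
      · exact hN (hij ▸ hfst)
      · have hij' : i < j := by omega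
        -- the window from i reaches j, where the element is not None
        have hall := (gsA_window_iff nl g i hg (by omega) hlt).mp hslc
        exact hN (hall j (by omega) (by omega))
  · have hemp : PySem.List.pyRange j ((nl.length : Int) - 2) 1 = [] := by
      rw [PySem.List.pyRange_one]
      have h0 : ((nl.length : Int) - 2 - j).toNat = 0 := by omega
      rw [h0]; rfl
    rw [hemp, gsLoopB, gsLoopA, dif_neg (by omega)]
termination_by ((nl.length : Int) - 2 - j).toNat
decreasing_by all_goals omega

-- ===== VERDICT (by name: the statement is the Claim_ definition above) =====
theorem get_startblock_spec : Claim_equal_get_startblock := by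
  intro start nl g _hDom hPre
  obtain ⟨hs, hg⟩ := hPre
  unfold Spec_get_startblock get_startblock get_startblock_alt
  have := gsB_inv nl g hg start 0 le_rfl (by omega) (by omega) (by intro k h1 h2; omega)
  simp only [sub_zero] at this
  rw [this]
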